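-- pv_equiv track=rewrite | github.com/kfinny/finnpie | finnpie/__init__.py | brot
-- ===== SOURCE A (Python) =====
-- def brot(data, n):
--     """
--
--     :param data:
--     :param n:
--     :return:
--     """
--     shiftarr = [128, 192, 224, 240, 248, 252, 254]
--     result = ''
--     n = n % 8
--     if n == 0:
--         return data
--     for x in data:
--         result += chr((ord(x) >> n) | ((ord(x) << (8 - n)) & shiftarr[n - 1]))
--     return result
-- ===== SOURCE B (Python) =====
-- def brot(data, n):
--     # Decompose the 8-bit rotate-by-n into n % 8 successive rotate-by-one passes.
--     for _ in range(n % 8):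
--         data = ''.join(chr((ord(c) >> 1) | ((ord(c) & 1) << 7)) for c in data)
--     return data
-- ===== Notes on version B (the rewrite author's own statement) =====
-- stated objective: alternative
-- what changed: B decomposes the rotate-by-n into n % 8 staged whole-string rotate-by-one passes (join over a generator each pass), instead of A's single pass that computes the n-bit rotation per character with a mask table and string concatenation.
import Mathlib
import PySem

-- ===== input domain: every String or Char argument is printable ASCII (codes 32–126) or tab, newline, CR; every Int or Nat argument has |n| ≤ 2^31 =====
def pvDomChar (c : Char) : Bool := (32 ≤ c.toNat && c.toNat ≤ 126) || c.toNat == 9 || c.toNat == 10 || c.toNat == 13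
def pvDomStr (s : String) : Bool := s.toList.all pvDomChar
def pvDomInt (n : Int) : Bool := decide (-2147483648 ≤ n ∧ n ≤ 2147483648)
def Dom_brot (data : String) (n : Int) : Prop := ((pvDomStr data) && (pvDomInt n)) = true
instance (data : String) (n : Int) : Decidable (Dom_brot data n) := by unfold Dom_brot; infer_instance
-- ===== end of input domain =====

-- B replaces A's single pass (n-bit rotation per character, masked via a shift table, built by
-- string concatenation) with n % 8 staged whole-string rotate-by-one passes; alternative decomposition.

-- ===== PORT A =====
-- A: n %= 8; if 0 return data; else concatenate chr((ord>>n) | ((ord<<(8-n)) & shiftarr[n-1])) per char.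
def brot (data : String) (n : Int) : String :=
  let shiftarr : List Nat := [128, 192, 224, 240, 248, 252, 254]
  let m : Nat := (PySem.Int.mod n 8).toNat
  if m = 0 then data
  else
    String.ofList (data.toList.foldl
      (fun acc x => acc ++ [Char.ofNat ((x.toNat >>> m) ||| ((x.toNat <<< (8 - m)) &&& shiftarr.getD (m - 1) 0))])
      [])

-- ===== PORT B =====
-- B's per-character single-bit rotation: chr((ord(c) >> 1) | ((ord(c) & 1) << 7))
def pvRotC (c : Char) : Char := Char.ofNat ((c.toNat >>> 1) ||| ((c.toNat &&& 1) <<< 7))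

-- B: for _ in range(n % 8): data = ''.join(chr((ord(c) >> 1) | ((ord(c) & 1) << 7)) for c in data)
def brot_alt (data : String) (n : Int) : String :=
  (List.range (PySem.Int.mod n 8).toNat).foldl
    (fun s _ => String.ofList (s.toList.map pvRotC)) data

-- ===== PRECONDITION & SPEC =====
def Spec_brot (data : String) (n : Int) (out : String) : Prop := out = brot_alt data n
instance (data : String) (n : Int) (out : String) : Decidable (Spec_brot data n out) := by unfold Spec_brot; infer_instance

-- ===== CLAIM (what is proved, stated in full; the proofs are below) =====
def Claim_equal_brot : Prop := ∀ (data : String) (n : Int), Dom_brot data n → Spec_brot data n (brot data n)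

-- ===== LEMMAS AND PROOFS =====

-- the single-bit rotation on code points
def pvRot1 (v : Nat) : Nat := (v >>> 1) ||| ((v &&& 1) <<< 7)

theorem pvRot1_lt (v : Nat) (h : v < 256) : pvRot1 v < 256 := by
  unfold pvRot1
  have h1 : v >>> 1 < 128 := by omega
  have h2 : (v &&& 1) <<< 7 ≤ 128 := by
    have := Nat.and_le_right (n := v) (m := 1); omega
  have := Nat.or_lt_two_pow (n := 8) (x := v >>> 1) (y := (v &&& 1) <<< 7) (by omega) (by omega)
  omega

theorem pvRotC_toNat (c : Char) (h : c.toNat < 256) : (pvRotC c).toNat = pvRot1 c.toNat := by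
  have hr : pvRot1 c.toNat < 256 := pvRot1_lt _ h
  have : Nat.isValidChar (pvRot1 c.toNat) := Or.inl (by omega)
  unfold pvRotC
  show (Char.ofNat (pvRot1 c.toNat)).toNat = pvRot1 c.toNat
  simp [Char.ofNat, this]

-- iterating the char-level rotation = iterating the Nat-level rotation (codes stay < 256 valid chars)
theorem pvIter_char (m : Nat) (c : Char) (h : c.toNat < 256) :
    pvRotC^[m] c = Char.ofNat (pvRot1^[m] c.toNat) ∧ (pvRot1^[m] c.toNat) < 256 := by
  induction m generalizing c with
  | zero => exact ⟨(Char.ofNat_toNat c).symm, h⟩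
  | succ k ih =>
    have hr : pvRot1 c.toNat < 256 := pvRot1_lt _ h
    have htn : (pvRotC c).toNat = pvRot1 c.toNat := pvRotC_toNat c h
    rw [Function.iterate_succ_apply, Function.iterate_succ_apply]
    have h2 := ih (pvRotC c) (by rw [htn]; exact hr)
    rw [htn] at h2
    exact h2

-- B's staged loop over the whole string = one map of the m-fold iterated char rotation
theorem pvFold_range (m : Nat) (s : String) :
    (List.range m).foldl (fun s _ => String.ofList (s.toList.map pvRotC)) s
      = String.ofList (s.toList.map (pvRotC^[m])) := by
  induction m with
  | zero => simp
  | succ k ih =>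
    rw [List.range_succ, List.foldl_append, ih]
    simp only [List.foldl_cons, List.foldl_nil, String.toList_ofList, List.map_map]
    congr 1
    apply List.map_congr_left
    intro x _
    show pvRotC (pvRotC^[k] x) = pvRotC^[k+1] x
    rw [Function.iterate_succ_apply']

-- the m-fold single-bit rotation equals A's rotate-by-m formula on bytes (finite check)
set_option maxRecDepth 4000 in
theorem pvIter_eq_formula (m : Nat) (h1 : 1 ≤ m) (h8 : m < 8) (v : Nat) (hv : v < 256) :
    pvRot1^[m] v = (v >>> m) ||| ((v <<< (8 - m)) &&&
      ([128, 192, 224, 240, 248, 252, 254] : List Nat).getD (m - 1) 0) := by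
  revert v
  interval_cases m <;> · intro v hv; revert hv; revert v; decide

-- ===== VERDICT (by name: the statement is the Claim_ definition above) =====
theorem brot_spec : Claim_equal_brot := by
  intro data n hdom
  unfold Spec_brot brot brot_alt
  set m : Nat := (PySem.Int.mod n 8).toNat with hm
  have hmlt : m < 8 := by
    have h1 := PySem.Int.mod_lt n (b := 8) (by norm_num)
    have h2 := PySem.Int.mod_nonneg n (b := 8) (by norm_num)
    omega
  by_cases h0 : m = 0
  · simp [h0]
  · simp only [if_neg h0]
    rw [pvFold_range, PySem.List.foldl_append_singleton_eq_map, List.nil_append]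
    congr 1
    apply List.map_congr_left
    intro x hx
    have hx256 : x.toNat < 256 := by
      have hall : pvDomStr data = true := by
        unfold Dom_brot at hdom; simp at hdom; exact hdom.1
      have := List.all_eq_true.mp hall x hx
      unfold pvDomChar at this
      simp at this
      omega
    have he := (pvIter_char m x hx256).1
    rw [he, pvIter_eq_formula m (by omega) hmlt x.toNat hx256]
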